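-- pv_equiv track=rewrite | github.com/anirudh-makuluri/deploypilot-ai | graph/nodes/dockerfile_generator.py | _strip_healthcheck_instructions
-- ===== SOURCE A (Python) =====
-- def _strip_healthcheck_instructions(content: str) -> str:
--     """Remove HEALTHCHECK instructions (including multi-line continuations)."""
--     if not content:
--         return content
--
--     lines = content.splitlines()
--     kept: list[str] = []
--     skipping_continuation = False
--
--     for line in lines:
--         stripped = line.lstrip()
--         if not skipping_continuation and stripped.upper().startswith("HEALTHCHECK"):
--             skipping_continuation = line.rstrip().endswith("\\")
--             continue
--         if skipping_continuation:
--             skipping_continuation = line.rstrip().endswith("\\")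
--             continue
--         kept.append(line)
--
--     result = "\n".join(kept)
--     if content.endswith("\n") and not result.endswith("\n"):
--         result += "\n"
--     return result
-- ===== SOURCE B (Python) =====
-- def _strip_healthcheck_instructions(content: str) -> str:
--     """Remove HEALTHCHECK instructions (including multi-line continuations)."""
--     lines = content.splitlines()
--     kept = []
--     i = 0
--     n = len(lines)
--     while i < n:
--         line = lines[i]
--         if line.lstrip().upper().startswith("HEALTHCHECK"):
--             while lines[i].rstrip().endswith("\\") and i + 1 < n:
--                 i += 1
--             i += 1
--         else:
--             kept.append(line)
--             i += 1
--     result = "\n".join(kept)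
--     if content.endswith("\n") and not result.endswith("\n"):
--         result += "\n"
--     return result
-- ===== Notes on version B (the rewrite author's own statement) =====
-- stated objective: alternative
-- what changed: Replaces A's carried skipping_continuation flag (one flat pass re-checking the flag on every line) with an explicit index walk whose nested inner loop consumes a whole HEALTHCHECK continuation block at once.
import Mathlib
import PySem

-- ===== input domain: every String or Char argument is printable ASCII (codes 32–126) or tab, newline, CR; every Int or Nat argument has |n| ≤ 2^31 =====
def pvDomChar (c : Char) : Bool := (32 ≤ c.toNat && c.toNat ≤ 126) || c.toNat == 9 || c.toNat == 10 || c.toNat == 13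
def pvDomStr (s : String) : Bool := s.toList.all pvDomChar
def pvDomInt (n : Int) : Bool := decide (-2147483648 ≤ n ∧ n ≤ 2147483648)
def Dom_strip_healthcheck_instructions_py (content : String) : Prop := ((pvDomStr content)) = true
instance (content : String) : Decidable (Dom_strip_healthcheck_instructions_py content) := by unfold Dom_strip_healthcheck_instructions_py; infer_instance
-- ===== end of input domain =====

-- B replaces A's carried skipping_continuation flag by an index walk with a nested
-- continuation-consuming loop (different decomposition; same cost, 'alternative').

-- ===== PORT A =====
-- A's loop body: state = (kept, skipping_continuation)
def aStep (st : List String × Bool) (line : String) : List String × Bool :=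
  let stripped := PySem.Str.lstrip line
  if !st.2 && PySem.Str.startswith (PySem.Str.upper stripped) "HEALTHCHECK" then
    (st.1, PySem.Str.endswith (PySem.Str.rstrip line) "\\")
  else if st.2 then
    (st.1, PySem.Str.endswith (PySem.Str.rstrip line) "\\")
  else
    (st.1 ++ [line], st.2)

def strip_healthcheck_instructions_py (content : String) : String :=
  if content = "" then content
  else
    let lines := PySem.Str.splitlines content
    let kept := (lines.foldl aStep ([], false)).1
    let result := PySem.Str.join "\n" kept
    if PySem.Str.endswith content "\n" && !PySem.Str.endswith result "\n" then
      result ++ "\n"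
    else result

-- ===== PORT B =====
-- inner while: consume continuation lines of the HEALTHCHECK block, return the rest
def altSkip (line : String) (rest : List String) : List String :=
  if PySem.Str.endswith (PySem.Str.rstrip line) "\\" then
    match rest with
    | [] => []
    | r :: rs => altSkip r rs
  else rest

theorem altSkip_length_le (line : String) (rest : List String) :
    (altSkip line rest).length ≤ rest.length := by
  induction rest generalizing line with
  | nil => unfold altSkip; split <;> simp
  | cons r rs ih =>
      unfold altSkip
      split
      · exact (ih r).trans (by simp)
      · simp

-- outer while over the lines, by index
def altGo : List String → List String
  | [] => []
  | l :: rest =>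
      if PySem.Str.startswith (PySem.Str.upper (PySem.Str.lstrip l)) "HEALTHCHECK" then
        altGo (altSkip l rest)
      else
        l :: altGo rest
termination_by ls => ls.length
decreasing_by
  · exact Nat.lt_succ_of_le (altSkip_length_le _ _)
  · simp

def strip_healthcheck_instructions_py_alt (content : String) : String :=
  let kept := altGo (PySem.Str.splitlines content)
  let result := PySem.Str.join "\n" kept
  if PySem.Str.endswith content "\n" && !PySem.Str.endswith result "\n" then
    result ++ "\n"
  else result

-- ===== PRECONDITION & SPEC =====
def Spec_strip_healthcheck_instructions_py (content : String) (out : String) : Prop := out = strip_healthcheck_instructions_py_alt content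
instance (content : String) (out : String) : Decidable (Spec_strip_healthcheck_instructions_py content out) := by unfold Spec_strip_healthcheck_instructions_py; infer_instance

-- ===== CLAIM (what is proved, stated in full; the proofs are below) =====
def Claim_equal_strip_healthcheck_instructions_py : Prop := ∀ (content : String), Dom_strip_healthcheck_instructions_py content → Spec_strip_healthcheck_instructions_py content (strip_healthcheck_instructions_py content)

-- ===== LEMMAS AND PROOFS =====

def endsBS (l : String) : Bool := PySem.Str.endswith (PySem.Str.rstrip l) "\\"
def isHC (l : String) : Bool :=
  PySem.Str.startswith (PySem.Str.upper (PySem.Str.lstrip l)) "HEALTHCHECK"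

theorem aStep_true (kept : List String) (line : String) :
    aStep (kept, true) line = (kept, endsBS line) := by
  simp [aStep, endsBS]

theorem aStep_false (kept : List String) (line : String) :
    aStep (kept, false) line =
      if isHC line then (kept, endsBS line) else (kept ++ [line], false) := by
  simp [aStep, endsBS, isHC]

theorem altSkip_nil (line : String) : altSkip line [] = [] := by
  unfold altSkip; split <;> rfl

theorem altSkip_cons (line r : String) (rs : List String) :
    altSkip line (r :: rs) = if endsBS line then altSkip r rs else r :: rs := by
  rw [altSkip, endsBS]

theorem altGo_cons (l : String) (rest : List String) :
    altGo (l :: rest) = if isHC l then altGo (altSkip l rest) else l :: altGo rest := by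
  rw [altGo]; rfl

-- the tail of the line list after A's skipping state returns to false
def dropCont : List String → List String
  | [] => []
  | l :: rest => if endsBS l then dropCont rest else rest

theorem dropCont_cons (l : String) (rest : List String) :
    dropCont (l :: rest) = if endsBS l then dropCont rest else rest := rfl

theorem dropCont_length_le (lines : List String) : (dropCont lines).length ≤ lines.length := by
  induction lines with
  | nil => simp [dropCont]
  | cons l rest ih =>
      unfold dropCont; split
      · exact ih.trans (Nat.le_succ _)
      · exact Nat.le_succ _

theorem altSkip_eq_dropCont (line : String) (rest : List String) :
    altSkip line rest = if endsBS line then dropCont rest else rest := by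
  induction rest generalizing line with
  | nil => rw [altSkip_nil]; unfold dropCont; split <;> rfl
  | cons r rs ih =>
      rw [altSkip_cons, ih r, dropCont_cons]

theorem foldl_aStep_true (lines : List String) (kept : List String) :
    (lines.foldl aStep (kept, true)).1 = ((dropCont lines).foldl aStep (kept, false)).1 := by
  induction lines generalizing kept with
  | nil => simp [dropCont]
  | cons l rest ih =>
      rw [List.foldl_cons, aStep_true, dropCont_cons]
      by_cases h : endsBS l
      · rw [h, if_pos rfl]; exact ih kept
      · rw [Bool.not_eq_true] at h
        rw [h, if_neg (by simp)]

theorem foldl_aStep_false (n : ℕ) (lines : List String) (kept : List String)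
    (hn : lines.length ≤ n) :
    (lines.foldl aStep (kept, false)).1 = kept ++ altGo lines := by
  induction n generalizing lines kept with
  | zero =>
      have : lines = [] := List.eq_nil_of_length_eq_zero (Nat.le_zero.mp hn)
      simp [this, altGo]
  | succ n ih =>
      match lines with
      | [] => simp [altGo]
      | l :: rest =>
          simp only [List.length_cons, Nat.succ_le_succ_iff] at hn
          rw [List.foldl_cons, aStep_false, altGo_cons, altSkip_eq_dropCont]
          by_cases hhc : isHC l
          · rw [if_pos hhc, if_pos hhc]
            by_cases hbs : endsBS l
            · rw [hbs, if_pos rfl, foldl_aStep_true,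
                ih _ _ ((dropCont_length_le rest).trans hn)]
            · rw [Bool.not_eq_true] at hbs
              rw [hbs, if_neg (by simp), ih rest kept hn]
          · rw [if_neg hhc, if_neg hhc, ih rest (kept ++ [l]) hn]
            simp

-- ===== VERDICT (by name: the statement is the Claim_ definition above) =====
theorem strip_healthcheck_instructions_py_spec : Claim_equal_strip_healthcheck_instructions_py := by
  intro content _
  show _ = _
  unfold strip_healthcheck_instructions_py strip_healthcheck_instructions_py_alt
  dsimp only
  by_cases h : content = ""
  · subst h
    have h1 : PySem.Str.splitlines "" = [] := by decide
    simp [h1, altGo]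
    decide
  · rw [if_neg h,
      foldl_aStep_false (PySem.Str.splitlines content).length _ [] (le_refl _)]
    simp
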